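-- pv_equiv track=rewrite | github.com/amadeuslars/Metaheuristic | Coding_project/Utils2.py | split_a_list_at_zeros
-- ===== SOURCE A (Python) =====
-- def split_a_list_at_zeros(k):
-- 	""" Function which takes as argument a valid solution and
-- 		breaks it down into vehicle sublists by splitting at the zeros"""
-- 	output_list = list()
-- 	while k:
-- 		try:
-- 			ind = k.index(0)
-- 			output_list.append(k[:ind])
-- 			k = k[ind+1:]
-- 		except ValueError:
-- 			output_list.append(k)
-- 			k = []
--
-- 	return output_list
-- ===== SOURCE B (Python) =====
-- def split_a_list_at_zeros(k):
--     """One pass: accumulate the current segment, emit it at each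
--     zero, append the trailing segment if nonempty."""
--     out = []
--     cur = []
--     for x in k:
--         if x == 0:
--             out.append(cur)
--             cur = []
--         else:
--             cur.append(x)
--     if cur:
--         out.append(cur)
--     return out
-- ===== Notes on version B (the rewrite author's own statement) =====
-- stated objective: idiomatic
-- what changed: Replaced the repeated k.index(0)+slicing while-loop by a single for-loop accumulating the current segment and emitting it at each zero.
import Mathlib
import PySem

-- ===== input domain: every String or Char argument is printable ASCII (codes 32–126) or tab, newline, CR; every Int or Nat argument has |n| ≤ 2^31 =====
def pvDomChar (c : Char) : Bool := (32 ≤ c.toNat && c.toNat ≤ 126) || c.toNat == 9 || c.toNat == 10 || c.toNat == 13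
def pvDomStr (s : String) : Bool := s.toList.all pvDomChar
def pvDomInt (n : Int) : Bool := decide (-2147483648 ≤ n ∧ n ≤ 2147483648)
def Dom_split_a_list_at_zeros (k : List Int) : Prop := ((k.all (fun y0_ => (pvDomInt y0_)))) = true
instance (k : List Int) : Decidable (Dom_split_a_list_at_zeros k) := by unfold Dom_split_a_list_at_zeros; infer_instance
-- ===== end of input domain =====

-- B replaces A's repeated index(0)+slice while-loop by a single accumulating pass (idiomatic one-pass split).


-- ===== PORT A =====
-- while k: ind = k.index(0); append k[:ind]; k = k[ind+1:]  (ValueError: append k; k = [])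
def split_a_list_at_zeros (k : List Int) : List (List Int) :=
  if k = [] then []
  else
    match h : PySem.List.index? k 0 with
    | some ind =>
        PySem.List.slice k (some 0) (some (ind : Int)) ::
          split_a_list_at_zeros (PySem.List.slice k (some ((ind : Int) + 1)) none)
    | none => [k]
termination_by k.length
decreasing_by
  have hind := PySem.List.getElem_of_index?_eq_some h
  obtain ⟨hlt, -, -⟩ := hind
  have : ((ind : Int) + 1) = ((ind + 1 : Nat) : Int) := by push_cast; ring
  rw [this, PySem.List.slice_from_natCast]
  simp [List.length_drop]
  omega

-- ===== PORT B =====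
def pvBStep (s : List (List Int) × List Int) (x : Int) : List (List Int) × List Int :=
  if x = 0 then (s.1 ++ [s.2], []) else (s.1, s.2 ++ [x])

def split_a_list_at_zeros_alt (k : List Int) : List (List Int) :=
  let s := k.foldl pvBStep ([], [])
  if s.2 = [] then s.1 else s.1 ++ [s.2]

-- ===== PRECONDITION & SPEC =====
def Spec_split_a_list_at_zeros (k : List Int) (out : List (List Int)) : Prop := out = split_a_list_at_zeros_alt k
instance (k : List Int) (out : List (List Int)) : Decidable (Spec_split_a_list_at_zeros k out) := by unfold Spec_split_a_list_at_zeros; infer_instance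

-- ===== CLAIM (what is proved, stated in full; the proofs are below) =====
def Claim_equal_split_a_list_at_zeros : Prop := ∀ (k : List Int), Dom_split_a_list_at_zeros k → Spec_split_a_list_at_zeros k (split_a_list_at_zeros k)

-- ===== LEMMAS AND PROOFS =====

-- reference splitter: segments of k with cur the pending (zero-free) prefix
def pvSeg (cur : List Int) : List Int → List (List Int)
  | [] => if cur = [] then [] else [cur]
  | x :: t => if x = 0 then cur :: pvSeg [] t else pvSeg (cur ++ [x]) t

theorem pvB_inv (k : List Int) : ∀ (out : List (List Int)) (cur : List Int),
    (let s := k.foldl pvBStep (out, cur); if s.2 = [] then s.1 else s.1 ++ [s.2])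
      = out ++ pvSeg cur k := by
  induction k with
  | nil => intro out cur; simp [pvSeg]; split_ifs <;> simp
  | cons x t ih =>
      intro out cur
      by_cases hx : x = 0
      · subst hx
        simpa [pvBStep, pvSeg] using ih (out ++ [cur]) []
      · simpa [pvBStep, pvSeg, hx] using ih out (cur ++ [x])

theorem pvB_eq_seg (k : List Int) : split_a_list_at_zeros_alt k = pvSeg [] k := by
  simpa using pvB_inv k [] []

theorem pvSeg_no_zero (k : List Int) (hk : (0 : Int) ∉ k) :
    ∀ cur : List Int, pvSeg cur k = if cur ++ k = [] then [] else [cur ++ k] := by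
  induction k with
  | nil => intro cur; simp [pvSeg]
  | cons y t ih =>
      intro cur
      have hy : y ≠ 0 := by intro h; exact hk (h ▸ List.mem_cons_self ..)
      have ht : (0 : Int) ∉ t := fun h => hk (List.mem_cons_of_mem _ h)
      simp [pvSeg, hy, ih ht (cur ++ [y])]

theorem pvSeg_split (pre suf : List Int) (hpre : (0 : Int) ∉ pre) :
    ∀ cur : List Int, pvSeg cur (pre ++ 0 :: suf) = (cur ++ pre) :: pvSeg [] suf := by
  induction pre with
  | nil => intro cur; simp [pvSeg]
  | cons y p ih =>
      intro cur
      have hy : y ≠ 0 := by intro h; exact hpre (h ▸ List.mem_cons_self ..)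
      have hp : (0 : Int) ∉ p := fun h => hpre (List.mem_cons_of_mem _ h)
      simpa [pvSeg, hy, List.append_assoc] using ih hp (cur ++ [y])

theorem pvA_eq_seg : ∀ (k : List Int), split_a_list_at_zeros k = pvSeg [] k := by
  intro k
  induction hn : k.length using Nat.strong_induction_on generalizing k with
  | _ n ih =>
    subst hn
    rw [split_a_list_at_zeros]
    by_cases hk : k = []
    · simp [hk, pvSeg]
    · simp only [hk, if_false]
      cases h : PySem.List.index? k 0 with
      | none =>
          have hnz : (0 : Int) ∉ k := (PySem.List.index?_eq_none_iff k 0).1 h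
          simp [pvSeg_no_zero k hnz [], hk]
      | some ind =>
          obtain ⟨pre, suf, hks, hlen, hnz⟩ := (PySem.List.index?_eq_some_iff k 0 ind).1 h
          have h1 : PySem.List.slice k (some 0) (some (ind : Int)) = pre := by
            rw [show ((0:Int)) = ((0 : Nat) : Int) by norm_num, PySem.List.slice_natCast]
            simp [hks, ← hlen]
          have h2 : PySem.List.slice k (some ((ind : Int) + 1)) none = suf := by
            rw [show ((ind : Int) + 1) = ((ind + 1 : Nat) : Int) by push_cast; ring,
              PySem.List.slice_from_natCast]
            simp [hks, ← hlen, List.drop_append]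
          have hless : suf.length < k.length := by
            simp [hks]; omega
          simp only [h1, h2]
          rw [ih suf.length (by simpa [h2] using hless) suf rfl, hks,
            pvSeg_split pre suf hnz []]
          simp

-- ===== VERDICT (by name: the statement is the Claim_ definition above) =====
theorem split_a_list_at_zeros_spec : Claim_equal_split_a_list_at_zeros := by
  intro k _
  unfold Spec_split_a_list_at_zeros
  rw [pvA_eq_seg, pvB_eq_seg]
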